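-- pv_equiv track=rewrite | github.com/hoho-wenda0228/nlp_playground | ner/train.py | generate_region
-- ===== SOURCE A (Python) =====
-- from typing import Dict, Iterable, List, Tuple
--
-- def generate_region(boundary_label: list) -> List[Tuple[int, int]]:
--     region_list = []
--
--     begin_label = 1
--     middle_label = 2
--     end_label = 3
--     single_label = 4
--     out_label = 0
--
--     for start_idx, head in enumerate(boundary_label):
--         if head == single_label or head == begin_label:
--             # single entity
--             if head == single_label:
--                 region_list.append((start_idx, start_idx))
--
--             # other entity
--             for end_idx, tail in enumerate(boundary_label[start_idx + 1:]):
--                 if tail == single_label or tail == end_label: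
--                     tail_idx = start_idx + 1 + end_idx
--                     region_list.append((start_idx, tail_idx))
--
--                 elif tail == out_label:
--                     break
--
--     return region_list
-- ===== SOURCE B (Python) =====
-- def generate_region(boundary_label: list):
--     n = len(boundary_label)
--     # one backward pass: fz[i] = index of first 0 at position >= i (n if none)
--     fz = [0] * n
--     nxt = n
--     for i in range(n - 1, -1, -1):
--         if boundary_label[i] == 0:
--             nxt = i
--         fz[i] = nxt
--     region_list = []
--     for i, head in enumerate(boundary_label):
--         if head == 1 or head == 4:
--             if head == 4:
--                 region_list.append((i, i))
--             stop = n if i + 1 >= n else fz[i + 1]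
--             for j in range(i + 1, stop):
--                 t = boundary_label[j]
--                 if t == 3 or t == 4:
--                     region_list.append((i, j))
--     return region_list
-- ===== Notes on version B (the rewrite author's own statement) =====
-- stated objective: alternative
-- what changed: A re-slices the tail of the list for every start and scans it with enumerate+break; B does one backward pass precomputing each position's next-zero boundary and then emits tails with a bounded index loop, no slice copies and no break.
import Mathlib
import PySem

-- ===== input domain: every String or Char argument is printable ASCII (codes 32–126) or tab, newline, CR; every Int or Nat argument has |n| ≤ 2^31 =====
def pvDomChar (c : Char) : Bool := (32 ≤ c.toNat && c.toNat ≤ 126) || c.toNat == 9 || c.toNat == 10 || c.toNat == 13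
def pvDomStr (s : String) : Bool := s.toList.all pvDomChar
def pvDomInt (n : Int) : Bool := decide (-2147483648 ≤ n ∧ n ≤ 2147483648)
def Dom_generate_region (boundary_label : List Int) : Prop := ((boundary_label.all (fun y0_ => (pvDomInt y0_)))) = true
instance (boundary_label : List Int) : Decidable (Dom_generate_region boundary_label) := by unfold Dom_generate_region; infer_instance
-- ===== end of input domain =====

-- B replaces A's per-start slice copy + break-scan by one backward pass precomputing each
-- position's next-zero boundary, then emits tails with bounded index loops (alternative structure).

-- ===== PORT A =====
-- A's inner loop: for end_idx, tail in enumerate(boundary_label[start_idx+1:]) with break at 0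
def pvInnerA (start_idx : Int) : List Int → Int → List (Int × Int)
  | [], _ => []
  | tail :: rest, end_idx =>
    if tail == 4 || tail == 3 then
      (start_idx, start_idx + 1 + end_idx) :: pvInnerA start_idx rest (end_idx + 1)
    else if tail == 0 then []
    else pvInnerA start_idx rest (end_idx + 1)

def generate_region (boundary_label : List Int) : List (Int × Int) :=
  (PySem.List.enumerate boundary_label).foldl (fun region_list p =>
    if p.2 == 4 || p.2 == 1 then
      (if p.2 == 4 then region_list ++ [(p.1, p.1)] else region_list)
        ++ pvInnerA p.1 (PySem.List.slice boundary_label (some (p.1 + 1)) none) 0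
    else region_list) []

-- ===== PORT B =====
-- B's backward pass: (pvFz off s).1 lists, for each position of s (at absolute offset off),
-- the absolute index of the first 0 at or after it (total length if none); .2 is that value at off.
def pvFz (off : Nat) : List Int → List Nat × Nat
  | [] => ([], off)
  | h :: t =>
    let r := pvFz (off + 1) t
    let nxt := if h == 0 then off else r.2
    (nxt :: r.1, nxt)

def generate_region_alt (boundary_label : List Int) : List (Int × Int) :=
  let n : Int := (boundary_label.length : Int)
  let fz := (pvFz 0 boundary_label).1
  (PySem.List.enumerate boundary_label).foldl (fun region_list p =>
    if p.2 == 1 || p.2 == 4 then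
      let acc1 := if p.2 == 4 then region_list ++ [(p.1, p.1)] else region_list
      let stop : Int := if n ≤ p.1 + 1 then n else ((fz.getD (p.1 + 1).toNat 0 : Nat) : Int)
      (PySem.List.pyRange (p.1 + 1) stop 1).foldl (fun a j =>
        if PySem.List.pyGetD boundary_label j 0 == 3 || PySem.List.pyGetD boundary_label j 0 == 4
        then a ++ [(p.1, j)] else a) acc1
    else region_list) []

-- ===== PRECONDITION & SPEC =====
def Spec_generate_region (boundary_label : List Int) (out : List (Int × Int)) : Prop := out = generate_region_alt boundary_label
instance (boundary_label : List Int) (out : List (Int × Int)) : Decidable (Spec_generate_region boundary_label out) := by unfold Spec_generate_region; infer_instance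

-- ===== CLAIM (what is proved, stated in full; the proofs are below) =====
def Claim_equal_generate_region : Prop := ∀ (boundary_label : List Int), Dom_generate_region boundary_label → Spec_generate_region boundary_label (generate_region boundary_label)

-- ===== LEMMAS AND PROOFS =====

-- distance to the first 0 in a list (its length if none)
def pvDist (s : List Int) : Nat := (s.takeWhile (fun x => !(x == 0))).length

theorem pvFz_snd (s : List Int) : ∀ off : Nat, (pvFz off s).2 = off + pvDist s := by
  induction s with
  | nil => intro off; simp [pvFz, pvDist]
  | cons h t ih =>
    intro off
    by_cases h0 : h = 0
    · simp [pvFz, pvDist, h0]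
    · simp [pvFz, pvDist, h0, ih (off + 1)]
      omega

theorem pvFz_getD (s : List Int) : ∀ off m : Nat, m < s.length →
    (pvFz off s).1.getD m 0 = off + m + pvDist (s.drop m) := by
  induction s with
  | nil => intro off m hm; simp at hm
  | cons h t ih =>
    intro off m hm
    cases m with
    | zero =>
      by_cases h0 : h = 0
      · simp [pvFz, pvDist, h0]
      · simp [pvFz, pvDist, h0, pvFz_snd]
        omega
    | succ m =>
      simp only [pvFz, List.getD_cons_succ, List.drop_succ_cons]
      rw [ih (off + 1) m (by simpa using hm)]
      omega

theorem pvInnerA_eq (bl : List Int) (i : Int) :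
    ∀ (s : List Int) (c : Int), 0 ≤ c → bl.drop c.toNat = s →
    pvInnerA i s (c - i - 1) =
      ((PySem.List.pyRange c (c + (pvDist s : Int)) 1).filter
          (fun j => PySem.List.pyGetD bl j 0 == 3 || PySem.List.pyGetD bl j 0 == 4)).map
        (fun j => (i, j)) := by
  intro s
  induction s with
  | nil =>
    intro c hc _
    simp [pvInnerA, pvDist]
  | cons h rest ih =>
    intro c hc hdrop
    have hlen : c.toNat < bl.length := by
      by_contra hge
      rw [List.drop_eq_nil_of_le (by omega)] at hdrop
      exact List.cons_ne_nil h rest hdrop.symm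
    have hget : PySem.List.pyGetD bl c 0 = h := by
      rw [PySem.List.pyGetD_eq_getElem bl 0 hc (by omega)]
      have h2 : (bl.drop c.toNat)[0]? = bl[c.toNat + 0]? := List.getElem?_drop
      rw [hdrop] at h2
      simp [List.getElem?_eq_getElem hlen] at h2
      exact h2.symm
    have hdrop' : bl.drop (c + 1).toNat = rest := by
      have h2 := congrArg (List.drop 1) hdrop
      simp [List.drop_drop] at h2
      have h3 : (c + 1).toNat = c.toNat + 1 := by omega
      rw [h3]
      simpa [Nat.add_comm] using h2
    by_cases h34 : h = 3 ∨ h = 4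
    · have hd : pvDist (h :: rest) = pvDist rest + 1 := by
        rcases h34 with h3 | h3 <;> simp [pvDist, h3]
      have hcons : PySem.List.pyRange c (c + (pvDist (h :: rest) : Int)) 1 =
          c :: PySem.List.pyRange (c + 1) (c + (pvDist (h :: rest) : Int)) 1 :=
        PySem.List.pyRange_one_cons (by rw [hd]; push_cast; omega)
      have hih := ih (c + 1) (by omega) hdrop'
      have hk : c + 1 - i - 1 = c - i - 1 + 1 := by ring
      rw [hk] at hih
      have hpred : (PySem.List.pyGetD bl c 0 == 3 || PySem.List.pyGetD bl c 0 == 4) = true := by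
        rw [hget]; rcases h34 with h3 | h3 <;> simp [h3]
      have hbA : (h == 4 || h == 3) = true := by
        rcases h34 with h3 | h3 <;> simp [h3]
      have hend : c + (pvDist (h :: rest) : Int) = c + 1 + (pvDist rest : Int) := by
        rw [hd]; push_cast; ring
      simp only [pvInnerA, hbA, if_true, hcons, List.filter_cons, hpred, List.map_cons]
      rw [hend] at *
      rw [hih]
      have : i + 1 + (c - i - 1) = c := by ring
      rw [this]
    · rw [not_or] at h34
      have hbA : (h == 4 || h == 3) = false := by simp [h34.1, h34.2]
      have hpred : (PySem.List.pyGetD bl c 0 == 3 || PySem.List.pyGetD bl c 0 == 4) = false := by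
        rw [hget]; simp [h34.1, h34.2]
      by_cases h0 : h = 0
      · have hd : pvDist (h :: rest) = 0 := by simp [pvDist, h0]
        simp [pvInnerA, h0, PySem.List.pyRange_one_eq_nil (le_refl c)]
      · have hd : pvDist (h :: rest) = pvDist rest + 1 := by simp [pvDist, h0]
        have hcons : PySem.List.pyRange c (c + (pvDist (h :: rest) : Int)) 1 =
            c :: PySem.List.pyRange (c + 1) (c + (pvDist (h :: rest) : Int)) 1 :=
          PySem.List.pyRange_one_cons (by rw [hd]; push_cast; omega)
        have hih := ih (c + 1) (by omega) hdrop'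
        have hk : c + 1 - i - 1 = c - i - 1 + 1 := by ring
        rw [hk] at hih
        have hend : c + (pvDist (h :: rest) : Int) = c + 1 + (pvDist rest : Int) := by
          rw [hd]; push_cast; ring
        have hh0 : (h == 0) = false := by simp [h0]
        simp only [pvInnerA, hbA, hh0, if_false, Bool.false_eq_true, hcons, List.filter_cons,
          hpred]
        rw [hend] at *
        rw [hih]

-- ===== VERDICT (by name: the statement is the Claim_ definition above) =====
theorem generate_region_spec : Claim_equal_generate_region := by
  intro bl _
  unfold Spec_generate_region generate_region generate_region_alt
  apply PySem.List.foldl_congr_mem'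
  intro p hp acc
  rcases (PySem.List.mem_enumerate_iff bl 0 p).1 hp with ⟨k, hk, hpk⟩
  subst hpk
  simp only [zero_add]
  set i : Int := (k : Int) with hi
  set h : Int := bl[k] with hh
  by_cases hhead : h = 1 ∨ h = 4
  · have hc1 : (h == 4 || h == 1) = true := by rcases hhead with h1 | h1 <;> simp [h1]
    have hc2 : (h == 1 || h == 4) = true := by rcases hhead with h1 | h1 <;> simp [h1]
    rw [if_pos hc1, if_pos hc2]
    set s := bl.drop (k + 1) with hs
    have ht : (i + 1).toNat = k + 1 := by omega
    have hslice : PySem.List.slice bl (some (i + 1)) none = s := by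
      rw [PySem.List.slice_from bl (by omega : (0:Int) ≤ i + 1), ht, hs]
    have hstop : (if (bl.length : Int) ≤ i + 1 then (bl.length : Int)
        else (((pvFz 0 bl).1.getD (i + 1).toNat 0 : Nat) : Int)) = i + 1 + (pvDist s : Int) := by
      by_cases hge : bl.length ≤ k + 1
      · have hsnil : s = [] := List.drop_eq_nil_of_le hge
        have : k + 1 = bl.length := by omega
        rw [if_pos (by omega), hsnil]
        simp [pvDist]; omega
      · rw [if_neg (by omega)]
        rw [ht, pvFz_getD bl 0 (k + 1) (by omega), ← hs]
        push_cast; omega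
    have hinner := pvInnerA_eq bl i s (i + 1) (by omega) (by rw [ht, hs])
    have hk0 : i + 1 - i - 1 = (0 : Int) := by ring
    rw [hk0] at hinner
    rw [hslice, hinner, hstop,
      PySem.List.foldl_append_if
        (fun j => PySem.List.pyGetD bl j 0 == 3 || PySem.List.pyGetD bl j 0 == 4)
        (fun j => (i, j))]
  · rw [not_or] at hhead
    have hc1 : ¬ ((h == 4 || h == 1) = true) := by simp [hhead.1, hhead.2]
    have hc2 : ¬ ((h == 1 || h == 4) = true) := by simp [hhead.1, hhead.2]
    rw [if_neg hc1, if_neg hc2]
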